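-- pv_equiv track=rewrite | github.com/HarshAgwl/WikipediaPageToVideo | VidWikiVideoGenerator.py | giveNumbers
-- ===== SOURCE A (Python) =====
-- def giveNumbers(number):
-- 	lst = []
-- 	while number>0:
-- 		if number<=5:
-- 			lst.append(number)
-- 			number = 0
-- 		elif number==6:
-- 			lst.append(3)
-- 			lst.append(3)
-- 			number = 0
-- 		elif number==7:
-- 			lst.append(4)
-- 			lst.append(3)
-- 			number = 0
-- 		elif number>7:
-- 			lst.append(5)
-- 			number -= 5
-- 	return lst
-- ===== SOURCE B (Python) =====
-- def giveNumbers(number):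
--     if number <= 0:
--         return []
--     k = 0 if number <= 7 else (number - 8) // 5 + 1
--     r = number - 5 * k
--     if r == 6:
--         tail = [3, 3]
--     elif r == 7:
--         tail = [4, 3]
--     else:
--         tail = [r]
--     return [5] * k + tail
-- ===== Notes on version B (the rewrite author's own statement) =====
-- stated objective: simpler
-- what changed: Replaces the repeated-subtraction while loop by a closed-form computation of the chunk count via floor division plus a direct remainder mapping, building the list with replication instead of appending.
import Mathlib
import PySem

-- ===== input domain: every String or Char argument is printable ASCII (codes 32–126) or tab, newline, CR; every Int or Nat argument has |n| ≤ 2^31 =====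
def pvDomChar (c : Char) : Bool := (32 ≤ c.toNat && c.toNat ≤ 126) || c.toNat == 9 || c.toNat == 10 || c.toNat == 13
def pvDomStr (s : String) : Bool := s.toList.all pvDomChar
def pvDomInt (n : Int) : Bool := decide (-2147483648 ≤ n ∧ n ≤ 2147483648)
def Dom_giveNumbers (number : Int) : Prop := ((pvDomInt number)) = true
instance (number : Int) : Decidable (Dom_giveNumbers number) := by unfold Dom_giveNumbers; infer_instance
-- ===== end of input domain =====

-- B replaces A's repeated-subtraction loop by a closed-form chunk count plus a direct remainder mapping (objective: simpler).

-- ===== PORT A =====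
-- literal transliteration of A's while loop: state is (number, lst)
def giveNumbersLoop (number : Int) (lst : List Int) : List Int :=
  if number > 0 then
    if number ≤ 5 then lst ++ [number]
    else if number = 6 then lst ++ [3, 3]
    else if number = 7 then lst ++ [4, 3]
    else giveNumbersLoop (number - 5) (lst ++ [5])
  else lst
termination_by number.toNat
decreasing_by omega

def giveNumbers (number : Int) : List Int := giveNumbersLoop number []

-- ===== PORT B =====
def giveNumbers_alt (number : Int) : List Int :=
  if number ≤ 0 then []
  else
    let k : Int := if number ≤ 7 then 0 else PySem.Int.floordiv (number - 8) 5 + 1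
    let r : Int := number - 5 * k
    let tail : List Int := if r = 6 then [3, 3] else if r = 7 then [4, 3] else [r]
    List.replicate k.toNat 5 ++ tail

-- ===== PRECONDITION & SPEC =====
def Spec_giveNumbers (number : Int) (out : List Int) : Prop := out = giveNumbers_alt number
instance (number : Int) (out : List Int) : Decidable (Spec_giveNumbers number out) := by unfold Spec_giveNumbers; infer_instance

-- ===== CLAIM (what is proved, stated in full; the proofs are below) =====
def Claim_equal_giveNumbers : Prop := ∀ (number : Int), Dom_giveNumbers number → Spec_giveNumbers number (giveNumbers number)

-- ===== LEMMAS AND PROOFS =====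

-- closed form unrolls one 5-chunk: for n > 7, alt n = 5 :: alt (n - 5)
theorem alt_step (n : Int) (h : n > 7) : giveNumbers_alt n = 5 :: giveNumbers_alt (n - 5) := by
  unfold giveNumbers_alt
  rw [if_neg (show ¬ n ≤ 0 by omega), if_neg (show ¬ n ≤ 7 by omega),
      if_neg (show ¬ n - 5 ≤ 0 by omega)]
  by_cases h12 : n ≤ 12
  · -- exactly one 5-chunk: (n-8)//5 = 0 and the remainder n-5 lies in 3..7
    have hd : PySem.Int.floordiv (n - 8) 5 = 0 := by
      rw [PySem.Int.floordiv_eq_iff_of_pos (by omega)]; omega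
    rw [if_pos (show n - 5 ≤ 7 by omega), hd]
    norm_num
  · -- at least two 5-chunks: (n-8)//5 = (n-13)//5 + 1
    have h2 := (PySem.Int.floordiv_eq_iff_of_pos (a := n - 5 - 8)
      (q := PySem.Int.floordiv (n - 5 - 8) 5) (show (0:Int) < 5 by omega)).mp rfl
    have hd : PySem.Int.floordiv (n - 8) 5 = PySem.Int.floordiv (n - 5 - 8) 5 + 1 := by
      rw [PySem.Int.floordiv_eq_iff_of_pos (by omega)]; omega
    rw [if_neg (show ¬ n - 5 ≤ 7 by omega), hd]
    set q := PySem.Int.floordiv (n - 5 - 8) 5 with hq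
    dsimp only
    have hr : n - 5 * (q + 1 + 1) = n - 5 - 5 * (q + 1) := by ring
    have hrep : (q + 1 + 1).toNat = (q + 1).toNat + 1 := by omega
    rw [hr, hrep, List.replicate_succ]
    simp

theorem loop_eq (m : Nat) (n : Int) (hn : n.toNat ≤ m) (lst : List Int) :
    giveNumbersLoop n lst = lst ++ giveNumbers_alt n := by
  induction m generalizing n lst with
  | zero =>
    rw [giveNumbersLoop, if_neg (show ¬ n > 0 by omega)]
    unfold giveNumbers_alt
    rw [if_pos (show n ≤ 0 by omega)]; simp
  | succ m ih =>
    by_cases hp : n > 0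
    · by_cases h5 : n ≤ 5
      · rw [giveNumbersLoop, if_pos hp, if_pos h5]
        unfold giveNumbers_alt
        rw [if_neg (show ¬ n ≤ 0 by omega), if_pos (show n ≤ 7 by omega)]
        norm_num
        rw [if_neg (show ¬ n = 6 by omega), if_neg (show ¬ n = 7 by omega)]
      · by_cases h6 : n = 6
        · subst h6
          rw [giveNumbersLoop]
          norm_num [giveNumbers_alt]
        · by_cases h7 : n = 7
          · subst h7
            rw [giveNumbersLoop]
            norm_num [giveNumbers_alt]
          · have h8 : n > 7 := by omega
            rw [giveNumbersLoop, if_pos hp, if_neg h5, if_neg h6, if_neg h7,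
                ih (n - 5) (by omega) (lst ++ [5]), alt_step n h8]
            simp
    · rw [giveNumbersLoop, if_neg hp]
      unfold giveNumbers_alt
      rw [if_pos (show n ≤ 0 by omega)]; simp

-- ===== VERDICT (by name: the statement is the Claim_ definition above) =====
theorem giveNumbers_spec : Claim_equal_giveNumbers := by
  intro n _
  unfold Spec_giveNumbers giveNumbers
  simpa using loop_eq n.toNat n le_rfl []
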